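-- pv_equiv track=rewrite | github.com/amstocker/aoc2024 | day7.py | evaluations
-- ===== SOURCE A (Python) =====
-- def evaluations(numbers, concat=False):
--     if len(numbers) == 1:
--         yield numbers[0]
--     else:
--         for intermediate in evaluations(numbers[1:], concat):
--             yield intermediate + numbers[0]
--             yield intermediate * numbers[0]
--             if concat:
--                 yield int(str(intermediate) + str(numbers[0]))
-- ===== SOURCE B (Python) =====
-- def evaluations(numbers, concat=False):
--     # Iterative bottom-up rebuild of the result list (no recursion); same yield order as the DFS.
--     results = [numbers[-1]]
--     for i in range(len(numbers) - 2, -1, -1):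
--         n = numbers[i]
--         new = []
--         for inter in results:
--             new.append(inter + n)
--             new.append(inter * n)
--             if concat:
--                 new.append(int(str(inter) + str(n)))
--         results = new
--     yield from results
-- ===== Notes on version B (the rewrite author's own statement) =====
-- stated objective: alternative
-- what changed: Replaces A's recursive generator (each level re-yields through a chain of nested generators) with an iterative bottom-up loop that rebuilds one flat result list per position, preserving the exact yield order.
import Mathlib
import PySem

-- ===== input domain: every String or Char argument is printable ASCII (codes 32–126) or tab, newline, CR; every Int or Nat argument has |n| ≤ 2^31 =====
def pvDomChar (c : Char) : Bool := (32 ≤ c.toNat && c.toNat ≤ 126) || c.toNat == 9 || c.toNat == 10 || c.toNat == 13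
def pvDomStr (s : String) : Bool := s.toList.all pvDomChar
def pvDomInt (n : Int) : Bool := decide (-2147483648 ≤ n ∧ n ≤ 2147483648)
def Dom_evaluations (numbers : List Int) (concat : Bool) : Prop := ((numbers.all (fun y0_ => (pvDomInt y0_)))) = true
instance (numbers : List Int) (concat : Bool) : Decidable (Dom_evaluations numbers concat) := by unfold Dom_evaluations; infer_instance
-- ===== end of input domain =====

-- B rebuilds the result list iteratively bottom-up instead of A's recursive generator; same values in the same order (return-value equivalence; both Pythons are generators).

-- ===== PORT A =====
-- int(str(a) + str(b)); Python raises ValueError when b < 0 ('5-3'), which Pre_ excludes, so .getD 0 is never taken inside Pre_.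
def pyCat (a b : Int) : Int :=
  (PySem.Int.ofChars? ((PySem.Int.toStr a).toList ++ (PySem.Int.toStr b).toList)).getD 0

def evaluations (numbers : List Int) (concat : Bool) : List Int :=
  match numbers with
  | [] => []          -- Python A recurses forever here (RecursionError); excluded by Pre_
  | [x] => [x]
  | x :: t =>
      (evaluations t concat).flatMap (fun inter =>
        [inter + x, inter * x] ++ (if concat then [pyCat inter x] else []))

-- ===== PORT B =====
-- inner 'for inter in results: new.append(...)' loop of Source B
def evalStep (concat : Bool) (n : Int) (results : List Int) : List Int :=
  results.foldl (fun new inter =>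
    new ++ [inter + n] ++ [inter * n] ++ (if concat then [pyCat inter n] else [])) []

def evaluations_alt (numbers : List Int) (concat : Bool) : List Int :=
  match numbers with
  | [] => []          -- Python B raises IndexError on numbers[-1]; excluded by Pre_
  | _ :: _ =>
    (PySem.List.pyRange ((numbers.length : Int) - 2) (-1) (-1)).foldl
      (fun results i => evalStep concat (PySem.List.pyGetD numbers i 0) results)
      [(PySem.List.pyGet? numbers (-1)).getD 0]

-- ===== PRECONDITION & SPEC =====
-- Pre_ excludes exactly the inputs where Python A raises: the empty list (RecursionError),
-- and concat=True with a negative element before the last (int(str(inter)+str(n)) → ValueError).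
def Pre_evaluations (numbers : List Int) (concat : Bool) : Prop :=
  numbers ≠ [] ∧ (concat = true → ∀ x ∈ numbers.dropLast, 0 ≤ x)
instance (numbers : List Int) (concat : Bool) : Decidable (Pre_evaluations numbers concat) := by unfold Pre_evaluations; infer_instance

def pvWitness_evaluations : List Int × Bool := ([2, 3, 5], true)

def Spec_evaluations (numbers : List Int) (concat : Bool) (out : List Int) : Prop := out = evaluations_alt numbers concat
instance (numbers : List Int) (concat : Bool) (out : List Int) : Decidable (Spec_evaluations numbers concat out) := by unfold Spec_evaluations; infer_instance

-- ===== CLAIM (what is proved, stated in full; the proofs are below) =====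
def Claim_equal_evaluations : Prop := ∀ (numbers : List Int) (concat : Bool), Dom_evaluations numbers concat → Pre_evaluations numbers concat → Spec_evaluations numbers concat (evaluations numbers concat)

-- ===== LEMMAS AND PROOFS =====

-- the inner append loop is a flatMap
lemma evalStep_eq (c : Bool) (n : Int) (rs : List Int) :
    evalStep c n rs
      = rs.flatMap (fun inter => [inter + n, inter * n] ++ (if c then [pyCat inter n] else [])) := by
  unfold evalStep
  have h : (fun (new : List Int) (inter : Int) =>
        new ++ [inter + n] ++ [inter * n] ++ (if c then [pyCat inter n] else []))
      = (fun new inter =>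
        new ++ ([inter + n, inter * n] ++ (if c then [pyCat inter n] else []))) := by
    funext new inter; simp
  rw [h, PySem.List.foldl_append_eq_flatMap]
  simp

-- the countdown index range of a list one longer: old indices shifted by one, then 0
lemma pyRange_countdown_split (m : Nat) :
    PySem.List.pyRange (m : Int) (-1) (-1)
      = ((PySem.List.pyRange ((m : Int) - 1) (-1) (-1)).map (· + 1)) ++ [(0 : Int)] := by
  rw [PySem.List.pyRange_neg_one, PySem.List.pyRange_neg_one]
  have h1 : ((m : Int) - (-1)).toNat = m + 1 := by omega
  have h2 : ((m : Int) - 1 - (-1)).toNat = m := by omega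
  rw [h1, h2, List.range_succ, List.map_append, List.map_map]
  congr 1
  · exact List.map_congr_left (fun k _ => by simp [Function.comp]; ring)
  · simp

lemma pyGetD_cons_succ (x : Int) (xs : List Int) (k : Int) (hk : 0 ≤ k) (d : Int) :
    PySem.List.pyGetD (x :: xs) (k + 1) d = PySem.List.pyGetD xs k d := by
  obtain ⟨n, rfl⟩ := Int.eq_ofNat_of_zero_le hk
  have h : (n : Int) + 1 = ((n + 1 : Nat) : Int) := by push_cast; ring
  rw [h, PySem.List.pyGetD_natCast, PySem.List.pyGetD_natCast]
  rfl

lemma pyGet?_cons_neg_one (x : Int) (xs : List Int) (hx : xs ≠ []) :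
    PySem.List.pyGet? (x :: xs) (-1) = PySem.List.pyGet? xs (-1) := by
  cases xs with
  | nil => exact absurd rfl hx
  | cons y ys =>
    simp [PySem.List.pyGet?, PySem.List.pyIdx?]
    rfl

lemma evaluations_alt_eq (c : Bool) : ∀ (t : List Int) (h : Int),
    evaluations_alt (h :: t) c = evaluations (h :: t) c := by
  intro t
  induction t with
  | nil =>
    intro h
    show (PySem.List.pyRange (((h :: []).length : Int) - 2) (-1) (-1)).foldl
        (fun results i => evalStep c (PySem.List.pyGetD (h :: []) i 0) results)
        [(PySem.List.pyGet? (h :: []) (-1)).getD 0] = _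
    norm_num
    simp [evaluations, PySem.List.pyGet?, PySem.List.pyIdx?]
  | cons b t2 ih =>
    intro h
    show (PySem.List.pyRange ((↑(t2.length + 2) : Int) - 2) (-1) (-1)).foldl
        (fun results i => evalStep c (PySem.List.pyGetD (h :: b :: t2) i 0) results)
        [(PySem.List.pyGet? (h :: b :: t2) (-1)).getD 0] = _
    have hcast : ((↑(t2.length + 2) : Int) - 2) = (t2.length : Int) := by push_cast; ring
    rw [hcast, pyRange_countdown_split, List.foldl_append, List.foldl_map,
        pyGet?_cons_neg_one h (b :: t2) (by simp)]
    have hcongr :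
        (PySem.List.pyRange ((t2.length : Int) - 1) (-1) (-1)).foldl
          (fun results k => evalStep c (PySem.List.pyGetD (h :: b :: t2) (k + 1) 0) results)
          [(PySem.List.pyGet? (b :: t2) (-1)).getD 0]
        = (PySem.List.pyRange ((t2.length : Int) - 1) (-1) (-1)).foldl
          (fun results k => evalStep c (PySem.List.pyGetD (b :: t2) k 0) results)
          [(PySem.List.pyGet? (b :: t2) (-1)).getD 0] := by
      refine PySem.List.foldl_congr_mem _ _ _ _ ?_
      intro acc k hk
      rw [pyGetD_cons_succ _ _ _ (by
        have := (PySem.List.mem_pyRange_neg_one.mp hk).1; omega)]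
    rw [hcongr]
    have hB : (PySem.List.pyRange ((t2.length : Int) - 1) (-1) (-1)).foldl
          (fun results k => evalStep c (PySem.List.pyGetD (b :: t2) k 0) results)
          [(PySem.List.pyGet? (b :: t2) (-1)).getD 0]
        = evaluations_alt (b :: t2) c := by
      show _ = (PySem.List.pyRange (((b :: t2).length : Int) - 2) (-1) (-1)).foldl
          (fun results i => evalStep c (PySem.List.pyGetD (b :: t2) i 0) results)
          [(PySem.List.pyGet? (b :: t2) (-1)).getD 0]
      simp only [List.length_cons]
      have : ((↑(t2.length + 1) : Int) - 2) = (t2.length : Int) - 1 := by push_cast; ring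
      rw [this]
    rw [hB, ih b]
    show evalStep c (PySem.List.pyGetD (h :: b :: t2) 0 0) (evaluations (b :: t2) c) = _
    have h0 : PySem.List.pyGetD (h :: b :: t2) 0 0 = h := by
      have := PySem.List.pyGetD_natCast (h :: b :: t2) 0 0
      simpa using this
    rw [h0, evalStep_eq]
    rfl

-- ===== VERDICT (by name: the statement is the Claim_ definition above) =====
theorem evaluations_spec : Claim_equal_evaluations := by
  intro numbers concat _ hpre
  unfold Spec_evaluations
  cases numbers with
  | nil => exact absurd rfl hpre.1
  | cons h t => exact (evaluations_alt_eq concat t h).symm
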